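-- pv_equiv track=rewrite | github.com/dragfly/dictare | src/voxtype/stt/faster_whisper.py | _filter_repetitions
-- ===== SOURCE A (Python) =====
-- def _filter_repetitions(text: str, max_repeats: int = 5) -> str:
--     """Filter out hallucinated repetitions (e.g., 'la la la la la la...').
--
--     Whisper can hallucinate repetitive patterns when there's background noise
--     or silence. This filter removes excessive consecutive repetitions.
--
--     Args:
--         text: Transcribed text to filter.
--         max_repeats: Maximum allowed consecutive repetitions of a word.
--
--     Returns:
--         Filtered text with repetitions truncated.
--     """
--     words = text.split()
--     if len(words) < max_repeats:
--         return text
--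
--     result = []
--     repeat_count = 1
--     for i, word in enumerate(words):
--         if i > 0 and word.lower() == words[i - 1].lower():
--             repeat_count += 1
--             if repeat_count > max_repeats:
--                 continue  # Skip excessive repetitions
--         else:
--             repeat_count = 1
--         result.append(word)
--
--     return " ".join(result)
-- ===== SOURCE B (Python) =====
-- def _filter_repetitions(text: str, max_repeats: int = 5) -> str:
--     """Truncate runs of consecutive case-insensitive word repetitions.
--
--     Splits into words; short texts are returned verbatim. Otherwise the words
--     are grouped into maximal consecutive runs of equal (case-insensitive)
--     words and each run is truncated to max_repeats words, always keeping at
--     least the first word of a run.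
--     """
--     words = text.split()
--     if len(words) < max_repeats:
--         return text
--
--     keep = max(1, max_repeats)
--     kept = []
--     i = 0
--     n = len(words)
--     while i < n:
--         j = i + 1
--         while j < n and words[j].lower() == words[i].lower():
--             j += 1
--         kept.extend(words[i:j][:keep])
--         i = j
--     return " ".join(kept)
-- ===== Notes on version B (the rewrite author's own statement) =====
-- stated objective: alternative
-- what changed: Replaced the per-word running-counter walk (increment/reset, skip via continue) by a run-based decomposition: an outer loop finds each maximal case-insensitive run with an inner scan and keeps at most max(1, max_repeats) words of it via a slice.
import Mathlib
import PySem

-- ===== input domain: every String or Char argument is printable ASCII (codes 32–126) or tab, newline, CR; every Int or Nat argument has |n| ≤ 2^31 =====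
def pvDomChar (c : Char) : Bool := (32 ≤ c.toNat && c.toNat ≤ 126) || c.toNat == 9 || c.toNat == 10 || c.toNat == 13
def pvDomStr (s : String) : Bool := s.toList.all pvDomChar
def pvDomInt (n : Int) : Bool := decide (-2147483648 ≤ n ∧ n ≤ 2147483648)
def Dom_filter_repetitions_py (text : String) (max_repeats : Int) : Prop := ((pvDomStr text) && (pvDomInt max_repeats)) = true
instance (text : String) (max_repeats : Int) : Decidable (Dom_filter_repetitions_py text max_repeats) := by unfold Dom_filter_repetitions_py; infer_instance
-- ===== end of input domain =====

-- B replaces A's running-counter walk by a run-based decomposition (find each maximal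
-- case-insensitive run, keep at most max(1, max_repeats) words of it); same cost, proved equal.

-- ===== PORT A =====
-- one loop step of A's for-loop: state (result, repeat_count), element (i, word)
def aStep (words : List String) (max_repeats : Int) (st : List String × Int) (iw : Int × String) : List String × Int :=
  if iw.1 > 0 && (PySem.Str.lower iw.2 == PySem.Str.lower ((PySem.List.pyGet? words (iw.1 - 1)).getD "")) then
    -- repeat_count += 1; skip the word if it exceeds max_repeats  (pyGet? is always in range here since i > 0)
    if st.2 + 1 > max_repeats then (st.1, st.2 + 1) else (st.1 ++ [iw.2], st.2 + 1)
  else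
    (st.1 ++ [iw.2], 1)

def filter_repetitions_py (text : String) (max_repeats : Int) : String :=
  let words := PySem.Str.split₀ text
  if (words.length : Int) < max_repeats then text
  else
    let st := (PySem.List.enumerate words).foldl (aStep words max_repeats) ([], 1)
    PySem.Str.join " " st.1

-- ===== PORT B =====
-- B's inner while-scan splits the remaining words at the end of the current run:
-- the run is the takeWhile part, the loop continues on the dropWhile part, and
-- words[i:j][:keep] is `run.take keep` (keep = max(1, max_repeats) ≥ 1, so .toNat is exact).
def altRuns (keep : Nat) : List String → List String
  | [] => []
  | w :: ws =>
      let p := fun x => PySem.Str.lower x == PySem.Str.lower w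
      ((w :: ws.takeWhile p).take keep) ++ altRuns keep (ws.dropWhile p)
  termination_by l => l.length
  decreasing_by
    simp only [List.length_cons]
    exact Nat.lt_succ_of_le (List.length_dropWhile_le _ _)

def filter_repetitions_py_alt (text : String) (max_repeats : Int) : String :=
  let words := PySem.Str.split₀ text
  if (words.length : Int) < max_repeats then text
  else
    let keep := (max 1 max_repeats).toNat
    PySem.Str.join " " (altRuns keep words)

-- ===== PRECONDITION & SPEC =====
def Spec_filter_repetitions_py (text : String) (max_repeats : Int) (out : String) : Prop := out = filter_repetitions_py_alt text max_repeats
instance (text : String) (max_repeats : Int) (out : String) : Decidable (Spec_filter_repetitions_py text max_repeats out) := by unfold Spec_filter_repetitions_py; infer_instance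

-- ===== CLAIM (what is proved, stated in full; the proofs are below) =====
def Claim_equal_filter_repetitions_py : Prop := ∀ (text : String) (max_repeats : Int), Dom_filter_repetitions_py text max_repeats → Spec_filter_repetitions_py text max_repeats (filter_repetitions_py text max_repeats)

-- ===== LEMMAS AND PROOFS =====

-- the list A's loop appends after the first word of a run, given the previous word and the counter
def goA (m : Int) (prev : String) (rc : Int) : List String → List String
  | [] => []
  | x :: ws =>
      if PySem.Str.lower x == PySem.Str.lower prev then
        (if rc + 1 > m then [] else [x]) ++ goA m x (rc + 1) ws
      else
        x :: goA m x 1 ws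

-- A's fold, started after the words pre₁ ++ [prev], produces goA
lemma foldA_eq (m : Int) (suf : List String) : ∀ (pre₁ : List String) (prev : String)
    (acc : List String) (rc : Int),
    ((PySem.List.enumerate suf ((pre₁.length : Int) + 1)).foldl
        (aStep (pre₁ ++ prev :: suf) m) (acc, rc)).1
      = acc ++ goA m prev rc suf := by
  induction suf with
  | nil => intro pre₁ prev acc rc; simp [PySem.List.enumerate, goA]
  | cons x suf ih =>
    intro pre₁ prev acc rc
    rw [PySem.List.enumerate_cons, List.foldl_cons]
    have hget : PySem.List.pyGet? (pre₁ ++ prev :: x :: suf) ((pre₁.length : Int) + 1 - 1)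
        = some prev := by
      have : ((pre₁.length : Int) + 1 - 1) = ((pre₁.length : Nat) : Int) := by omega
      rw [this, PySem.List.pyGet?_natCast]
      simp
    have hpos : ((0:Int) < (pre₁.length : Int) + 1) := by positivity
    by_cases h : PySem.Str.lower x == PySem.Str.lower prev
    · have hrest : ∀ acc' rc',
          ((PySem.List.enumerate suf ((pre₁.length : Int) + 1 + 1)).foldl
              (aStep (pre₁ ++ prev :: x :: suf) m) (acc', rc')).1
            = acc' ++ goA m x rc' suf := by
        intro acc' rc'
        have := ih (pre₁ ++ [prev]) x acc' rc'
        simpa [List.append_assoc, add_assoc] using this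
      by_cases hm : rc + 1 > m
      · have hstep : aStep (pre₁ ++ prev :: x :: suf) m (acc, rc) ((pre₁.length : Int) + 1, x)
            = (acc, rc + 1) := by
          simp [aStep, h, hpos, hm]
        rw [hstep, hrest]
        simp [goA, h, hm]
      · have hstep : aStep (pre₁ ++ prev :: x :: suf) m (acc, rc) ((pre₁.length : Int) + 1, x)
            = (acc ++ [x], rc + 1) := by
          simp [aStep, h, hpos, hm]
        rw [hstep, hrest]
        simp [goA, h, hm]
    · have hstep : aStep (pre₁ ++ prev :: x :: suf) m (acc, rc) ((pre₁.length : Int) + 1, x)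
          = (acc ++ [x], 1) := by
        simp [aStep, h, hpos]
      rw [hstep]
      have := ih (pre₁ ++ [prev]) x (acc ++ [x]) 1
      simp only [List.append_assoc, List.singleton_append, List.length_append,
        List.length_cons, List.length_nil] at this ⊢
      rw [show ((pre₁.length : Int) + 1 + 1) = (((pre₁.length + 1 : Nat) : Int) + 1) by omega]
      rw [this]
      simp [goA, h]

-- goA is the run decomposition: truncated rest of the current run, then altRuns on the rest
lemma goA_eq_runs (m : Int) : ∀ (ws : List String) (w : String) (rc : Int), 1 ≤ rc →
    goA m w rc ws
      = (ws.takeWhile (fun x => PySem.Str.lower x == PySem.Str.lower w)).take ((max 1 m - rc).toNat)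
        ++ altRuns (max 1 m).toNat (ws.dropWhile (fun x => PySem.Str.lower x == PySem.Str.lower w)) := by
  intro ws
  induction ws with
  | nil => intro w rc _; simp [goA, altRuns]
  | cons x ws ih =>
    intro w rc hrc
    by_cases h : PySem.Str.lower x == PySem.Str.lower w
    · have hlow : PySem.Str.lower x = PySem.Str.lower w := by exact beq_iff_eq.mp h
      have hpred : (fun y => PySem.Str.lower y == PySem.Str.lower x)
          = (fun y => PySem.Str.lower y == PySem.Str.lower w) := by
        funext y; rw [hlow]
      have hIH := ih x (rc + 1) (by omega)
      rw [hpred] at hIH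
      simp only [goA, h, if_pos, List.takeWhile_cons, List.dropWhile_cons]
      by_cases hm : rc + 1 > m
      · have h0 : (max 1 m - rc).toNat = 0 := by omega
        have h0' : (max 1 m - (rc + 1)).toNat = 0 := by omega
        simp [hm, hIH, h0, h0']
      · have h1 : (max 1 m - rc).toNat = ((max 1 m - (rc + 1)).toNat) + 1 := by omega
        simp [hm, hIH, h1]
    · have hIH := ih x 1 (by omega)
      have hk : (max 1 m).toNat = ((max 1 m - 1).toNat) + 1 := by omega
      simp only [goA, h, if_false, List.takeWhile_cons, List.dropWhile_cons,
        Bool.false_eq_true, List.take_nil, List.nil_append]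
      rw [altRuns, hIH, hk]
      simp only [List.take_succ_cons, List.cons_append]

-- ===== VERDICT (by name: the statement is the Claim_ definition above) =====
theorem filter_repetitions_py_spec : Claim_equal_filter_repetitions_py := by
  intro text m _
  unfold Spec_filter_repetitions_py filter_repetitions_py filter_repetitions_py_alt
  simp only
  by_cases hlen : ((PySem.Str.split₀ text).length : Int) < m
  · simp [hlen]
  · simp only [hlen, if_false]
    congr 1
    cases hw : PySem.Str.split₀ text with
    | nil => simp [PySem.List.enumerate, altRuns]
    | cons w ws =>
      rw [PySem.List.enumerate_cons]
      rw [List.foldl_cons]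
      have hfirst : aStep (w :: ws) m ([], 1) (0, w) = ([w], 1) := by
        simp [aStep]
      rw [hfirst]
      have := foldA_eq m ws [] w [w] 1
      simp only [List.nil_append, List.length_nil, Nat.cast_zero, zero_add] at this ⊢
      rw [this]
      rw [goA_eq_runs m ws w 1 le_rfl]
      rw [altRuns]
      have hk : (max 1 m).toNat = ((max 1 m - 1).toNat) + 1 := by omega
      rw [hk]
      simp only [List.take_succ_cons, List.cons_append, List.nil_append]
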